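-- pv_equiv track=rewrite | github.com/Vusal-Layijov/daily_ds-a | python/maximalNetworkRank.py | getMaxFun
-- ===== SOURCE A (Python) =====
-- def getMaxFun(singer, length):
--     # First, calculate initial fun without considering the order.
--     unique_singers = len(set(singer))
--     total_fun = sum(length) * unique_singers
--
--     # Find the maximum fun by considering the decrement in fun
--     # if a singer with more than one song appears earlier.
--     # We sort by singer to group songs by the same singer together.
--     combined = sorted(zip(singer, length), key=lambda x: (x[0], -x[1]))
--
--     # Track seen singers to adjust the fun calculation.
--     seen_singers = set()
--     for s, l in combined:
--         if s in seen_singers: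
--             # We already had this singer; calculate the reduction in fun.
--             total_fun -= l
--         else:
--             seen_singers.add(s)
--
--     return total_fun
-- ===== SOURCE B (Python) =====
-- def getMaxFun(singer, length):
--     # One pass, no sort: keep the best (longest) song seen so far per singer;
--     # every non-best song of a singer is subtracted exactly once.
--     total = sum(length) * len(set(singer))
--     best = {}
--     for s, l in zip(singer, length):
--         if s in best:
--             if l > best[s]:
--                 total -= best[s]
--                 best[s] = l
--             else:
--                 total -= l
--         else:
--             best[s] = l
--     return total
-- ===== Notes on version B (the rewrite author's own statement) =====
-- stated objective: faster
-- what changed: Replaced sort-by-(singer,-length)-then-scan-with-a-seen-set by a single unsorted pass that keeps a per-singer running maximum in a dict and subtracts every non-maximal song length on the fly.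
import Mathlib
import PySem

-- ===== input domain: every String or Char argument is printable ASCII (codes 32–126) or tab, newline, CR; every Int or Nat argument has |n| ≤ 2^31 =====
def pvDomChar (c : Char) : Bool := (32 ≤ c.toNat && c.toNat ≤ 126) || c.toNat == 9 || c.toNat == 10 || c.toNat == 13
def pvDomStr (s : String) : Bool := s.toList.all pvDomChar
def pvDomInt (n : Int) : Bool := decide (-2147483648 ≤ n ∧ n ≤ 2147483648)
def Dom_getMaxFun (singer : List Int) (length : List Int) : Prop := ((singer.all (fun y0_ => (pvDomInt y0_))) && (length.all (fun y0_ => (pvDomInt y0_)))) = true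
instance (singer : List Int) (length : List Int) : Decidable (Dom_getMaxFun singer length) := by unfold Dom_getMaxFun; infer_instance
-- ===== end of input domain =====

-- B replaces A's sort-by-(singer,-length) + seen-set scan by a single unsorted pass
-- keeping a per-singer running maximum in a dict (objective: faster).

-- ===== PORT A =====
def getMaxFun (singer : List Int) (length : List Int) : Int :=
  let uniqueSingers : Int := (PySem.Set.ofList singer).length
  let totalFun : Int := length.sum * uniqueSingers
  let combined := PySem.List.sorted2 (singer.zip length) (fun x => x.1) (fun x => -x.2)
  let res := combined.foldl
    (fun (st : PySem.Set Int × Int) p =>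
      if PySem.Set.contains st.1 p.1 then (st.1, st.2 - p.2)
      else (PySem.Set.add st.1 p.1, st.2))
    (PySem.Set.empty, totalFun)
  res.2

-- ===== PORT B =====
def getMaxFun_alt (singer : List Int) (length : List Int) : Int :=
  let total : Int := length.sum * ((PySem.Set.ofList singer).length : Int)
  let res := (singer.zip length).foldl
    (fun (st : PySem.Dict Int Int × Int) p =>
      if st.1.contains p.1 then
        if st.1.getD p.1 0 < p.2 then (st.1.insert p.1 p.2, st.2 - st.1.getD p.1 0)
        else (st.1, st.2 - p.2)
      else (st.1.insert p.1 p.2, st.2))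
    (PySem.Dict.empty, total)
  res.2

-- ===== PRECONDITION & SPEC =====
def Spec_getMaxFun (singer : List Int) (length : List Int) (out : Int) : Prop := out = getMaxFun_alt singer length
instance (singer : List Int) (length : List Int) (out : Int) : Decidable (Spec_getMaxFun singer length out) := by unfold Spec_getMaxFun; infer_instance

-- ===== CLAIM (what is proved, stated in full; the proofs are below) =====
def Claim_equal_getMaxFun : Prop := ∀ (singer : List Int) (length : List Int), Dom_getMaxFun singer length → Spec_getMaxFun singer length (getMaxFun singer length)

-- ===== LEMMAS AND PROOFS =====

-- A's loop step and B's loop step, abstracted for the proofs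
def pvAStep (st : PySem.Set Int × Int) (p : Int × Int) : PySem.Set Int × Int :=
  if PySem.Set.contains st.1 p.1 then (st.1, st.2 - p.2) else (PySem.Set.add st.1 p.1, st.2)

def pvBStep (st : PySem.Dict Int Int × Int) (p : Int × Int) : PySem.Dict Int Int × Int :=
  if st.1.contains p.1 then
    if st.1.getD p.1 0 < p.2 then (st.1.insert p.1 p.2, st.2 - st.1.getD p.1 0)
    else (st.1, st.2 - p.2)
  else (st.1.insert p.1 p.2, st.2)

-- the dict half of B's loop alone ("running max per singer")
def pvDStep (d : PySem.Dict Int Int) (p : Int × Int) : PySem.Dict Int Int :=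
  if d.contains p.1 then (if d.getD p.1 0 < p.2 then d.insert p.1 p.2 else d)
  else d.insert p.1 p.2

-- optional max: ⊥-extended max on Option Int
def pvMerge : Option Int → Option Int → Option Int
  | none, g => g
  | o, none => o
  | some a, some b => some (max a b)

def pvGmax (s : Int) (L : List (Int × Int)) : Option Int :=
  ((L.filter (fun p => p.1 = s)).map Prod.snd).foldl (fun o x => pvMerge o (some x)) none

def pvS (L : List (Int × Int)) : Int :=
  ∑ s ∈ (L.map Prod.fst).toFinset, (pvGmax s L).getD 0

theorem pvMerge_none_right (o : Option Int) : pvMerge o none = o := by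
  cases o <;> rfl

theorem pvMerge_assoc (a b c : Option Int) :
    pvMerge (pvMerge a b) c = pvMerge a (pvMerge b c) := by
  cases a <;> cases b <;> cases c <;> simp [pvMerge, max_assoc]

theorem pvMerge_comm (a b : Option Int) : pvMerge a b = pvMerge b a := by
  cases a <;> cases b <;> simp [pvMerge, max_comm]

theorem pvFoldl_merge (l : List Int) (o : Option Int) :
    l.foldl (fun o x => pvMerge o (some x)) o
      = pvMerge o (l.foldl (fun o x => pvMerge o (some x)) none) := by
  induction l generalizing o with
  | nil => simp [List.foldl, pvMerge_none_right]
  | cons x l ih =>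
    simp only [List.foldl]
    rw [ih (pvMerge o (some x)), ih (pvMerge none (some x)), pvMerge_assoc]
    rfl

theorem pvGmax_perm {L L' : List (Int × Int)} (h : L.Perm L') (s : Int) :
    pvGmax s L = pvGmax s L' := by
  unfold pvGmax
  exact @List.Perm.foldl_eq _ _ _ _ _
    ⟨fun (o : Option Int) (x y : Int) => by
      rw [pvMerge_assoc, pvMerge_assoc, pvMerge_comm (some x) (some y)]⟩
    (List.Perm.map _ (List.Perm.filter _ h)) none

theorem pvS_perm {L L' : List (Int × Int)} (h : L.Perm L') : pvS L = pvS L' := by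
  unfold pvS
  rw [List.toFinset_eq_of_perm _ _ (List.Perm.map _ h)]
  exact Finset.sum_congr rfl (fun s _ => by rw [pvGmax_perm h])

theorem pvGmax_cons_ne (s : Int) (p : Int × Int) (L : List (Int × Int)) (h : p.1 ≠ s) :
    pvGmax s (p :: L) = pvGmax s L := by
  unfold pvGmax
  simp [h]

theorem pvGmax_cons_eq (s b : Int) (L : List (Int × Int)) :
    pvGmax s ((s, b) :: L) = pvMerge (some b) (pvGmax s L) := by
  unfold pvGmax
  simp only [List.filter_cons, decide_true, if_pos, List.map_cons, List.foldl]
  rw [pvFoldl_merge]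
  rfl

-- get? after the running-max fold
theorem pvGet?_fold (L : List (Int × Int)) (d : PySem.Dict Int Int) (s : Int) :
    (L.foldl pvDStep d).get? s = pvMerge (d.get? s) (pvGmax s L) := by
  induction L generalizing d with
  | nil => simp [pvGmax, pvMerge_none_right]
  | cons p L ih =>
    obtain ⟨a, b⟩ := p
    simp only [List.foldl]
    rw [ih]
    by_cases hs : a = s
    · subst hs
      rw [pvGmax_cons_eq]
      by_cases hc : d.contains a = true
      · have hsome : (d.get? a).isSome := by rw [← PySem.Dict.contains_eq_isSome_get?, hc]
        obtain ⟨c, hcv⟩ := Option.isSome_iff_exists.mp hsome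
        have hgd : d.getD a 0 = c := by simp [PySem.Dict.getD, hcv]
        simp only [pvDStep, hc, if_true, hgd]
        by_cases hlt : c < b
        · simp only [hlt, if_true, PySem.Dict.get?_insert_self, hcv]
          rw [← pvMerge_assoc]
          have : pvMerge (some c) (some b) = some b := by
            simp [pvMerge, max_eq_right (le_of_lt hlt)]
          rw [this]
        · simp only [hlt, if_false, hcv]
          rw [← pvMerge_assoc]
          have : pvMerge (some c) (some b) = some c := by
            simp [pvMerge, max_eq_left (le_of_not_gt hlt)]
          rw [this]
      · have hc' : d.contains a = false := by simpa using hc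
        have hnone : d.get? a = none := (PySem.Dict.get?_eq_none_iff_contains d a).mpr hc'
        simp only [pvDStep, hc', Bool.false_eq_true, if_false, PySem.Dict.get?_insert_self, hnone]
        rfl
    · rw [pvGmax_cons_ne s (a, b) L hs]
      have : (pvDStep d (a, b)).get? s = d.get? s := by
        unfold pvDStep
        split_ifs <;> first | rw [PySem.Dict.get?_insert_of_ne _ _ (fun h => hs h.symm)] | rfl
      rw [this]

theorem pvKeys_fold_nodup (L : List (Int × Int)) (d : PySem.Dict Int Int)
    (h : d.keys.Nodup) : (L.foldl pvDStep d).keys.Nodup := by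
  induction L generalizing d with
  | nil => exact h
  | cons p L ih =>
    simp only [List.foldl]
    apply ih
    unfold pvDStep
    split_ifs <;> first | exact PySem.Dict.nodup_keys_insert _ _ _ h | exact h

theorem pvMem_keys_fold (L : List (Int × Int)) (d : PySem.Dict Int Int) (s : Int) :
    s ∈ (L.foldl pvDStep d).keys ↔ s ∈ d.keys ∨ s ∈ L.map Prod.fst := by
  induction L generalizing d with
  | nil => simp
  | cons p L ih =>
    simp only [List.foldl, List.map_cons, List.mem_cons]
    rw [ih]
    have hk : s ∈ (pvDStep d p).keys ↔ s = p.1 ∨ s ∈ d.keys := by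
      unfold pvDStep
      split_ifs with h1 h2
      · rw [PySem.Dict.mem_keys_insert]
      · constructor
        · exact fun h => Or.inr h
        · rintro (h | h)
          · subst h; exact (PySem.Dict.contains_iff_mem_keys d _).mp h1
          · exact h
      · rw [PySem.Dict.mem_keys_insert]
    rw [hk]
    tauto

-- sum of the values after overwriting an existing key
theorem pvSum_map_overwrite (k v : Int) (l : List (Int × Int))
    (hnd : (l.map Prod.fst).Nodup) (hmem : (l.map Prod.fst).contains k = true) :
    ((l.map (fun p => if p.1 == k then (k, v) else p)).map Prod.snd).sum
      = (l.map Prod.snd).sum - ((Option.map Prod.snd (l.find? (fun p => p.1 == k))).getD 0) + v := by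
  induction l with
  | nil => simp at hmem
  | cons p l ih =>
    obtain ⟨a, c⟩ := p
    by_cases h : a = k
    · subst h
      have hrest : ∀ q ∈ l, (fun p : Int × Int => if p.1 == a then (a, v) else p) q = q := by
        intro q hq
        have : q.1 ≠ a := by
          simp only [List.map_cons, List.nodup_cons] at hnd
          intro he
          exact hnd.1 (he ▸ List.mem_map_of_mem hq)
        simp [this]
      simp only [List.map_cons, BEq.rfl, if_pos, List.find?_cons, List.map_congr_left hrest]
      simp only [List.sum_cons]
      simp
      ring
    · have hb : (a == k) = false := by simp [h]
      simp only [List.map_cons, List.sum_cons, List.find?_cons, hb, Bool.false_eq_true, if_false]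
      have hnd' : (l.map Prod.fst).Nodup := by
        simp only [List.map_cons, List.nodup_cons] at hnd; exact hnd.2
      have hmem' : (l.map Prod.fst).contains k = true := by
        simp only [List.map_cons, List.contains_cons, Bool.or_eq_true, beq_iff_eq] at hmem
        rcases hmem with h' | h'
        · exact absurd h'.symm h
        · exact h'
      rw [ih hnd' hmem']
      ring

theorem pvValues_insert_not_contains (d : PySem.Dict Int Int) (k v : Int)
    (h : d.contains k = false) :
    (d.insert k v).values.sum = d.values.sum + v := by
  simp [PySem.Dict.insert, h, PySem.Dict.values]

theorem pvValues_insert_contains (d : PySem.Dict Int Int) (k v : Int)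
    (hnd : d.keys.Nodup) (h : d.contains k = true) :
    (d.insert k v).values.sum = d.values.sum - d.getD k 0 + v := by
  have hmem : (d.items.map Prod.fst).contains k = true := by
    have := (PySem.Dict.contains_iff_mem_keys d k).mp h
    simpa [PySem.Dict.keys, List.contains_iff_mem] using this
  have := pvSum_map_overwrite k v d.items (by simpa [PySem.Dict.keys] using hnd) hmem
  simp only [PySem.Dict.insert, h, if_pos, PySem.Dict.values, PySem.Dict.getD, PySem.Dict.get?]
  exact this

-- B's loop in closed form
theorem pvBloop_closed (L : List (Int × Int)) (d : PySem.Dict Int Int) (t : Int)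
    (hnd : d.keys.Nodup) :
    (L.foldl pvBStep (d, t)).2 =
      t - (L.map Prod.snd).sum - d.values.sum + (L.foldl pvDStep d).values.sum := by
  induction L generalizing d t with
  | nil => simp
  | cons p L ih =>
    obtain ⟨a, b⟩ := p
    simp only [List.foldl, List.map_cons, List.sum_cons]
    by_cases hc : d.contains a = true
    · by_cases hlt : d.getD a 0 < b
      · have hstep : pvBStep (d, t) (a, b) = (d.insert a b, t - d.getD a 0) := by
          simp [pvBStep, hc, hlt]
        have hdstep : pvDStep d (a, b) = d.insert a b := by simp [pvDStep, hc, hlt]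
        rw [hstep, ih _ _ (PySem.Dict.nodup_keys_insert _ _ _ hnd), hdstep,
          pvValues_insert_contains d a b hnd hc]
        ring
      · have hstep : pvBStep (d, t) (a, b) = (d, t - b) := by simp [pvBStep, hc, hlt]
        have hdstep : pvDStep d (a, b) = d := by simp [pvDStep, hc, hlt]
        rw [hstep, ih _ _ hnd, hdstep]
        ring
    · have hc' : d.contains a = false := by simpa using hc
      have hstep : pvBStep (d, t) (a, b) = (d.insert a b, t) := by
        simp [pvBStep, hc', Bool.false_eq_true]
      have hdstep : pvDStep d (a, b) = d.insert a b := by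
        simp [pvDStep, hc', Bool.false_eq_true]
      rw [hstep, ih _ _ (PySem.Dict.nodup_keys_insert _ _ _ hnd), hdstep,
        pvValues_insert_not_contains d a b hc']
      ring

theorem pvValues_fold_empty_sum (L : List (Int × Int)) :
    (L.foldl pvDStep PySem.Dict.empty).values.sum = pvS L := by
  have hnd : (L.foldl pvDStep PySem.Dict.empty).keys.Nodup :=
    pvKeys_fold_nodup L _ PySem.Dict.nodup_keys_empty
  rw [PySem.Dict.values_eq_map_keys _ hnd 0]
  rw [← List.sum_toFinset _ hnd]
  have hf : (L.foldl pvDStep PySem.Dict.empty).keys.toFinset = (L.map Prod.fst).toFinset := by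
    ext s
    simp only [List.mem_toFinset]
    rw [pvMem_keys_fold]
    simp [PySem.Dict.keys, PySem.Dict.empty]
  rw [hf]
  unfold pvS
  apply Finset.sum_congr rfl
  intro s _
  have := pvGet?_fold L PySem.Dict.empty s
  simp only [PySem.Dict.getD, this]
  have hemp : (PySem.Dict.empty : PySem.Dict Int Int).get? s = none := by
    simp [PySem.Dict.get?, PySem.Dict.empty]
  rw [hemp]
  rfl

-- the comparison sorted2 uses (key = (singer, -length))
def pvLt (a b : Int × Int) : Bool :=
  decide (a.1 < b.1) || (!decide (b.1 < a.1) && decide (-a.2 < -b.2))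

def pvRb (a b : Int × Int) : Prop := pvLt b a = false

theorem pvLt_iff (a b : Int × Int) :
    pvLt a b = true ↔ (a.1 < b.1 ∨ (¬ b.1 < a.1 ∧ b.2 < a.2)) := by
  unfold pvLt
  simp only [Bool.or_eq_true, Bool.and_eq_true, Bool.not_eq_true', decide_eq_true_eq,
    decide_eq_false_iff_not]
  omega

theorem pvRb_iff (a b : Int × Int) :
    pvRb a b ↔ (¬ b.1 < a.1 ∧ (a.1 < b.1 ∨ b.2 ≤ a.2)) := by
  unfold pvRb
  rw [← Bool.not_eq_true, pvLt_iff]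
  omega

theorem pvInsertBy_pairwise (x : Int × Int) (l : List (Int × Int))
    (hl : l.Pairwise pvRb) : (PySem.List.insertBy pvLt x l).Pairwise pvRb := by
  induction l with
  | nil => simp [PySem.List.insertBy]
  | cons y ys ih =>
    rw [List.pairwise_cons] at hl
    show (if pvLt x y = true then x :: y :: ys else y :: PySem.List.insertBy pvLt x ys).Pairwise pvRb
    by_cases h : pvLt x y = true
    · rw [if_pos h]
      rw [List.pairwise_cons]
      constructor
      · intro z hz
        rcases List.mem_cons.mp hz with hzy | hzys
        · subst hzy
          rw [pvRb_iff]; rw [pvLt_iff] at h; omega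
        · have hyz := hl.1 z hzys
          rw [pvRb_iff] at hyz ⊢; rw [pvLt_iff] at h; omega
      · exact List.pairwise_cons.mpr hl
    · rw [if_neg h]
      rw [List.pairwise_cons]
      constructor
      · intro z hz
        rcases (PySem.List.mem_insertBy pvLt x z ys).mp hz with hzx | hzys
        · rw [hzx, pvRb_iff]
          have hxy : ¬ (pvLt x y = true) := h
          rw [pvLt_iff] at hxy; omega
        · exact hl.1 z hzys
      · exact ih hl.2

theorem pvFoldl_insertBy_pairwise (xs acc : List (Int × Int)) (h : acc.Pairwise pvRb) :
    (xs.foldl (fun acc x => PySem.List.insertBy pvLt x acc) acc).Pairwise pvRb := by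
  induction xs generalizing acc with
  | nil => exact h
  | cons x xs ih => exact ih _ (pvInsertBy_pairwise x acc h)

theorem pvSorted2_pairwise (xs : List (Int × Int)) :
    (PySem.List.sorted2 xs (fun x => x.1) (fun x => -x.2)).Pairwise pvRb := by
  have : PySem.List.sorted2 xs (fun x => x.1) (fun x => -x.2)
      = xs.foldl (fun acc x => PySem.List.insertBy pvLt x acc) [] := rfl
  rw [this]
  exact pvFoldl_insertBy_pairwise xs [] (by simp)

theorem pvSet_contains_add (s : PySem.Set Int) (a x : Int) :
    PySem.Set.contains (PySem.Set.add s a) x = (x == a || PySem.Set.contains s x) := by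
  unfold PySem.Set.add
  by_cases h : PySem.Set.contains s a = true
  · rw [if_pos h]
    by_cases hx : x = a
    · subst hx
      simp only [BEq.rfl, Bool.true_or]
      exact h
    · simp [hx]
  · rw [if_neg h]
    show List.contains (s ++ [a]) x = _
    rw [List.contains_append]
    by_cases hx : x = a <;> simp [hx, Bool.or_comm, PySem.Set.contains]

-- simulation: on a list where each singer's first entry carries its largest length,
-- A's seen-set loop and B's running-max loop subtract the same amounts
theorem pvSim (L : List (Int × Int)) (seen : PySem.Set Int) (d : PySem.Dict Int Int) (t : Int)
    (hpw : L.Pairwise pvRb)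
    (hc : ∀ s : Int, PySem.Set.contains seen s = d.contains s)
    (hb : ∀ p ∈ L, d.contains p.1 = true → p.2 ≤ d.getD p.1 0) :
    (L.foldl pvAStep (seen, t)).2 = (L.foldl pvBStep (d, t)).2 := by
  induction L generalizing seen d t with
  | nil => rfl
  | cons p L ih =>
    obtain ⟨a, b⟩ := p
    rw [List.pairwise_cons] at hpw
    simp only [List.foldl]
    by_cases hcd : d.contains a = true
    · have hA : pvAStep (seen, t) (a, b) = (seen, t - b) := by
        unfold pvAStep; rw [hc a, hcd]; simp
      have hle : b ≤ d.getD a 0 := hb (a, b) (List.mem_cons_self) hcd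
      have hB : pvBStep (d, t) (a, b) = (d, t - b) := by
        simp [pvBStep, hcd, not_lt.mpr hle]
      rw [hA, hB]
      exact ih seen d (t - b) hpw.2 hc (fun p hp => hb p (List.mem_cons_of_mem _ hp))
    · have hcd' : d.contains a = false := by simpa using hcd
      have hA : pvAStep (seen, t) (a, b) = (PySem.Set.add seen a, t) := by
        unfold pvAStep; rw [hc a, hcd']; simp
      have hB : pvBStep (d, t) (a, b) = (d.insert a b, t) := by
        simp [pvBStep, hcd', Bool.false_eq_true]
      rw [hA, hB]
      apply ih _ _ t hpw.2
      · intro s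
        rw [pvSet_contains_add, PySem.Dict.contains_insert, hc s]
      · intro p hp hcp
        by_cases hpa : p.1 = a
        · have hRb := hpw.1 p hp
          rw [pvRb_iff] at hRb
          have : p.2 ≤ b := by omega
          rw [hpa, PySem.Dict.getD_insert_self]
          exact this
        · have hcontains : d.contains p.1 = true := by
            rw [PySem.Dict.contains_insert] at hcp
            simp only [Bool.or_eq_true, beq_iff_eq] at hcp
            rcases hcp with h | h
            · exact absurd h hpa
            · exact h
          rw [PySem.Dict.getD_insert, if_neg hpa]
          exact hb p (List.mem_cons_of_mem _ hp) hcontains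

-- ===== VERDICT (by name: the statement is the Claim_ definition above) =====
theorem getMaxFun_spec : Claim_equal_getMaxFun := by
  intro singer length _
  unfold Spec_getMaxFun getMaxFun getMaxFun_alt
  simp only
  set T : Int := length.sum * ((PySem.Set.ofList singer).length : Int) with hT
  set Z := singer.zip length with hZ
  set C := PySem.List.sorted2 Z (fun x => x.1) (fun x => -x.2) with hC
  have hperm : C.Perm Z := PySem.List.sorted2_perm Z _ _ false
  have h1 : (C.foldl pvAStep (PySem.Set.empty, T)).2 = (C.foldl pvBStep (PySem.Dict.empty, T)).2 := by
    apply pvSim C PySem.Set.empty PySem.Dict.empty T (pvSorted2_pairwise Z)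
    · intro s; rfl
    · intro p _ hcp
      simp [PySem.Dict.contains, PySem.Dict.empty] at hcp
  have h2 : (C.foldl pvBStep (PySem.Dict.empty, T)).2
      = T - (C.map Prod.snd).sum + pvS C := by
    rw [pvBloop_closed C PySem.Dict.empty T PySem.Dict.nodup_keys_empty,
      pvValues_fold_empty_sum]
    simp [PySem.Dict.values, PySem.Dict.empty]
  have h3 : (Z.foldl pvBStep (PySem.Dict.empty, T)).2
      = T - (Z.map Prod.snd).sum + pvS Z := by
    rw [pvBloop_closed Z PySem.Dict.empty T PySem.Dict.nodup_keys_empty,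
      pvValues_fold_empty_sum]
    simp [PySem.Dict.values, PySem.Dict.empty]
  have hsum : (C.map Prod.snd).sum = (Z.map Prod.snd).sum :=
    List.Perm.sum_eq (List.Perm.map _ hperm)
  have hS : pvS C = pvS Z := pvS_perm hperm
  show (C.foldl pvAStep (PySem.Set.empty, T)).2 = (Z.foldl pvBStep (PySem.Dict.empty, T)).2
  rw [h1, h2, hsum, hS, ← h3]
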